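-- pv_equiv track=rewrite | github.com/HozyMozy/FYP_Nonogram_Solver | nonogram_solver.py | permToRestriction
-- ===== SOURCE A (Python) =====
-- def permToRestriction(row):
--     currentRow = [0]
--     l = 0
--     for i in range(len(row)):
--         if row[i] != 0:
--             currentRow[l] += 1
--         else:
--             currentRow.append(0)
--             l += 1
--     currentRow = [i for i in currentRow if i != 0]
--     return currentRow
-- ===== SOURCE B (Python) =====
-- def permToRestriction(row):
--     res = []
--     i, n = 0, len(row)
--     while i < n:
--         if row[i] != 0:
--             j = i
--             while j < n and row[j] != 0:
--                 j += 1
--             res.append(j - i)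
--             i = j
--         else:
--             i += 1
--     return res
-- ===== Notes on version B (the rewrite author's own statement) =====
-- stated objective: alternative
-- what changed: Replaces A's grow-a-counter-list-then-filter-zeros accumulator with a two-pointer run scan that emits each maximal nonzero run's length directly (inner scan to the run's end), never materialising zero counters.
import Mathlib
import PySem

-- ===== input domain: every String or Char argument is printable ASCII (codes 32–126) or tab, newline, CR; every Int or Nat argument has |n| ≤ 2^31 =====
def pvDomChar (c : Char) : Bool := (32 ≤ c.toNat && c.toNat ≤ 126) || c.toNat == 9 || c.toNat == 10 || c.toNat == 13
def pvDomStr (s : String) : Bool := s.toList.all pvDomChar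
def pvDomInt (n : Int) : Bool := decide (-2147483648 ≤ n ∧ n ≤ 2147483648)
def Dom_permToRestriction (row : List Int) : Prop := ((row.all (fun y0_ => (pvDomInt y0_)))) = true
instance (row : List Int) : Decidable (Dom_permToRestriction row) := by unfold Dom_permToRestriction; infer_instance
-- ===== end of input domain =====

-- B replaces A's grow-a-counter-list-then-filter accumulator with a two-pointer run scan
-- that emits each maximal nonzero run's length directly (objective: alternative).


-- ===== PORT A =====
-- One loop step of A: `currentRow[l] += 1` (index l is always in range, so getD/set are exact)
-- or `currentRow.append(0); l += 1`.
def pvAStep (st : List Int × Nat) (x : Int) : List Int × Nat :=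
  if x != 0 then (st.1.set st.2 (st.1.getD st.2 0 + 1), st.2)
  else (st.1 ++ [0], st.2 + 1)

def permToRestriction (row : List Int) : List Int :=
  ((row.foldl pvAStep ([0], 0)).1).filter (· != 0)

-- ===== PORT B =====
-- Inner while loop of B: length of the leading run of nonzeros, and the remaining suffix.
def pvSpanNz : List Int → Nat × List Int
  | [] => (0, [])
  | x :: xs => if x != 0 then ((pvSpanNz xs).1 + 1, (pvSpanNz xs).2) else (0, x :: xs)

theorem pvSpanNz_len (xs : List Int) : (pvSpanNz xs).2.length ≤ xs.length := by
  induction xs with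
  | nil => simp [pvSpanNz]
  | cons x xs ih =>
    simp only [pvSpanNz]
    split
    · exact Nat.le_succ_of_le ih
    · exact Nat.le_refl _

-- Outer while loop of B: skip a zero, or emit the nonzero run's length and jump past it.
def pvAltGo : List Int → List Int
  | [] => []
  | x :: xs =>
    if x != 0 then (((pvSpanNz xs).1 : Int) + 1) :: pvAltGo (pvSpanNz xs).2
    else pvAltGo xs
termination_by xs => xs.length
decreasing_by
  · exact Nat.lt_succ_of_le (pvSpanNz_len xs)
  · exact Nat.lt_succ_self _

def permToRestriction_alt (row : List Int) : List Int := pvAltGo row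

-- ===== PRECONDITION & SPEC =====
def Spec_permToRestriction (row : List Int) (out : List Int) : Prop := out = permToRestriction_alt row
instance (row : List Int) (out : List Int) : Decidable (Spec_permToRestriction row out) := by unfold Spec_permToRestriction; infer_instance

-- ===== CLAIM (what is proved, stated in full; the proofs are below) =====
def Claim_equal_permToRestriction : Prop := ∀ (row : List Int), Dom_permToRestriction row → Spec_permToRestriction row (permToRestriction row)

-- ===== LEMMAS AND PROOFS =====

-- Common reference function: run lengths with an open run of current length c.
def pvRunF (c : Int) : List Int → List Int
  | [] => if c != 0 then [c] else []
  | x :: xs =>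
    if x != 0 then pvRunF (c + 1) xs
    else if c != 0 then c :: pvRunF 0 xs else pvRunF 0 xs

-- A's fold, started from state (ys ++ [c], ys.length), filters to ys.filter ++ pvRunF c rest.
theorem pvA_fold (rest : List Int) : ∀ (ys : List Int) (c : Int),
    ((List.foldl pvAStep (ys ++ [c], ys.length) rest).1).filter (· != 0)
      = ys.filter (· != 0) ++ pvRunF c rest := by
  induction rest with
  | nil =>
    intro ys c
    simp only [List.foldl_nil, pvRunF, List.filter_append]
    by_cases hc : c = 0 <;> simp [hc]
  | cons x xs ih =>
    intro ys c
    by_cases hx : x = 0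
    · have h1 : pvAStep (ys ++ [c], ys.length) x = ((ys ++ [c]) ++ [0], (ys ++ [c]).length) := by
        simp [pvAStep, hx]
      rw [List.foldl_cons, h1, ih (ys ++ [c]) 0]
      by_cases hc : c = 0 <;>
        simp [pvRunF, hx, hc, List.filter_append, List.append_assoc]
    · have h1 : pvAStep (ys ++ [c], ys.length) x = (ys ++ [c + 1], ys.length) := by
        simp [pvAStep, hx]
      rw [List.foldl_cons, h1, ih ys (c + 1)]
      simp [pvRunF, hx]

-- B-side: the inner span corresponds to extending the open run.
theorem pvSpan_runF (xs : List Int) : ∀ (c : Int), 0 < c →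
    pvRunF c xs = (c + ((pvSpanNz xs).1 : Int)) :: pvRunF 0 (pvSpanNz xs).2 := by
  induction xs with
  | nil =>
    intro c hc
    have : c ≠ 0 := by omega
    simp [pvRunF, pvSpanNz, this]
  | cons x xs ih =>
    intro c hc
    by_cases hx : x = 0
    · have hc' : c ≠ 0 := by omega
      have h0 : pvRunF 0 ((0 : Int) :: xs) = pvRunF 0 xs := by simp [pvRunF]
      subst hx
      simp [pvRunF, pvSpanNz, hc', h0]
    · have h := ih (c + 1) (by omega)
      simp only [pvRunF, pvSpanNz, if_pos (show (x != 0) = true by simpa using hx)]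
      rw [h]
      congr 1
      push_cast
      ring

theorem pvAltGo_runF (xs : List Int) : pvAltGo xs = pvRunF 0 xs := by
  induction xs using pvAltGo.induct with
  | case1 => simp [pvAltGo, pvRunF]
  | case2 x xs hx ih =>
    have h := pvSpan_runF xs 1 (by omega)
    have h0 : pvRunF 0 (x :: xs) = pvRunF 1 xs := by simp [pvRunF, hx]
    rw [pvAltGo, if_pos hx, ih, h0, h]
    congr 1
    ring
  | case3 x xs hx ih =>
    have hx' : x = 0 := by simpa using hx
    rw [pvAltGo, if_neg hx, ih]
    simp [pvRunF, hx']

-- ===== VERDICT (by name: the statement is the Claim_ definition above) =====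
theorem permToRestriction_spec : Claim_equal_permToRestriction := by
  intro row _
  show permToRestriction row = permToRestriction_alt row
  unfold permToRestriction permToRestriction_alt
  have h := pvA_fold row [] 0
  simpa [pvAltGo_runF] using h
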